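-- pv_equiv track=rewrite | github.com/xiaolili2019/- | caleba_work.py | select_images_per_category
-- ===== SOURCE A (Python) =====
-- categories = 5  # 假设我们根据某些特征分为5类（这个数字通常根据具体的问题和数据特征来选择，可以根据领域知识、数据分布以及实际需求来确定最合适的聚类数目。）
--
-- def select_images_per_category(labels, train_per_category, test_per_category):
--     category_images = {i: [] for i in range(categories)}
--     for filename, label in labels.items():
--         if len(category_images[label]) < (train_per_category + test_per_category):
--             category_images[label].append(filename)
--     train_filenames = []
--     test_filenames = []
--     for label in range(categories):
--         train_filenames.extend(category_images[label][:train_per_category])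
--         test_filenames.extend(category_images[label][train_per_category:train_per_category + test_per_category])
--     return train_filenames, test_filenames
-- ===== SOURCE B (Python) =====
-- categories = 5
--
-- def select_images_per_category(labels, train_per_category, test_per_category):
--     counts = {i: 0 for i in range(categories)}
--     train_buckets = {i: [] for i in range(categories)}
--     test_buckets = {i: [] for i in range(categories)}
--     for filename, label in labels.items():
--         c = counts[label]
--         if c < train_per_category:
--             train_buckets[label].append(filename)
--             counts[label] = c + 1
--         elif c < train_per_category + test_per_category:
--             test_buckets[label].append(filename)
--             counts[label] = c + 1
--     train_filenames = []
--     test_filenames = []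
--     for i in range(categories):
--         train_filenames += train_buckets[i]
--         test_filenames += test_buckets[i]
--     return train_filenames, test_filenames
-- ===== Notes on version B (the rewrite author's own statement) =====
-- stated objective: alternative
-- what changed: Single pass that routes each filename directly into its category's train or test bucket via a per-category counter, replacing A's collect-then-slice (fill capped buckets, then slice each into train/test parts).
-- outside the precondition, e.g. on select_images_per_category({'a': 0, 'b': 0}, -1, 3): A returns (['a'], ['b']), B returns ([], ['a', 'b']); on select_images_per_category({'a': 0, 'b': 0}, 2, -1): A returns (['a'], []), B returns (['a', 'b'], [])
import Mathlib
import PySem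

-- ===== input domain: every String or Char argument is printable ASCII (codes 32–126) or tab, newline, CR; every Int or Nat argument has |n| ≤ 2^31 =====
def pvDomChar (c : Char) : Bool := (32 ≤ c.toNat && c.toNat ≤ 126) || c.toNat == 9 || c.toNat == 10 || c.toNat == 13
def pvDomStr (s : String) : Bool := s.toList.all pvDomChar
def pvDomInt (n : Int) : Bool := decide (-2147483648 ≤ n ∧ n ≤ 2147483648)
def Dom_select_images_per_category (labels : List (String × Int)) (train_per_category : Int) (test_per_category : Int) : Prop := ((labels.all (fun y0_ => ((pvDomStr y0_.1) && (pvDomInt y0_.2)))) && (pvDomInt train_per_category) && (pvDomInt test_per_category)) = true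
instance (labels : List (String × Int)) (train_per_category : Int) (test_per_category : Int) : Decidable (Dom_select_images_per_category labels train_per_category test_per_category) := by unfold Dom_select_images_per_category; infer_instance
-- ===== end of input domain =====

-- B replaces A's collect-then-slice with single-pass routing into per-category train/test buckets (objective: alternative decomposition, same cost).

-- ===== PORT A =====
def select_images_per_category (labels : List (String × Int)) (train_per_category : Int) (test_per_category : Int) : List String × List String :=
  -- category_images = {i: [] for i in range(categories)}   (categories = 5)
  let category_images : PySem.Dict Int (List String) :=
    PySem.Dict.ofList ((PySem.List.pyRange 0 5 1).map (fun i => (i, ([] : List String))))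
  -- for filename, label in labels.items(): if len(...) < tr+te: append
  -- (Python raises KeyError for a label outside range(5); Pre_ excludes those inputs, the port uses getD there)
  let category_images := labels.foldl (fun d p =>
    let bucket := d.getD p.2 []
    if (bucket.length : Int) < train_per_category + test_per_category then
      d.insert p.2 (bucket ++ [p.1])
    else d) category_images
  -- for label in range(categories): extend train with [:tr], test with [tr:tr+te]
  (PySem.List.pyRange 0 5 1).foldl (fun (acc : List String × List String) l =>
    (acc.1 ++ PySem.List.slice (category_images.getD l []) none (some train_per_category),
     acc.2 ++ PySem.List.slice (category_images.getD l []) (some train_per_category)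
                (some (train_per_category + test_per_category)))) ([], [])

-- ===== PORT B =====
def select_images_per_category_alt (labels : List (String × Int)) (train_per_category : Int) (test_per_category : Int) : List String × List String :=
  let counts : PySem.Dict Int Int :=
    PySem.Dict.ofList ((PySem.List.pyRange 0 5 1).map (fun i => (i, (0 : Int))))
  let train_buckets : PySem.Dict Int (List String) :=
    PySem.Dict.ofList ((PySem.List.pyRange 0 5 1).map (fun i => (i, ([] : List String))))
  let test_buckets : PySem.Dict Int (List String) :=
    PySem.Dict.ofList ((PySem.List.pyRange 0 5 1).map (fun i => (i, ([] : List String))))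
  -- for filename, label in labels.items(): route by the running count  (KeyError outside range(5) is excluded by Pre_)
  let st := labels.foldl (fun (st : PySem.Dict Int Int × PySem.Dict Int (List String) × PySem.Dict Int (List String)) p =>
    let c := st.1.getD p.2 0
    if c < train_per_category then
      (st.1.insert p.2 (c + 1), st.2.1.insert p.2 (st.2.1.getD p.2 [] ++ [p.1]), st.2.2)
    else if c < train_per_category + test_per_category then
      (st.1.insert p.2 (c + 1), st.2.1, st.2.2.insert p.2 (st.2.2.getD p.2 [] ++ [p.1]))
    else st) (counts, train_buckets, test_buckets)
  -- for i in range(categories): concatenate the buckets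
  (PySem.List.pyRange 0 5 1).foldl (fun (acc : List String × List String) i =>
    (acc.1 ++ st.2.1.getD i [], acc.2 ++ st.2.2.getD i [])) ([], [])

-- ===== PRECONDITION & SPEC =====
-- Pre_ excludes labels outside range(5), on which Python A raises KeyError, and (natural-domain restriction)
-- negative per-category caps with a nonempty label dict and a positive total, on which A's behaviour is an
-- accident of negative-index slicing; degenerate corners where the cap values cannot bite (empty dict,
-- nothing selectable, or every category under the total cap with te ≤ 0) are kept and proved equal.
def Pre_select_images_per_category (labels : List (String × Int)) (train_per_category : Int) (test_per_category : Int) : Prop :=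
  (∀ p ∈ labels, 0 ≤ p.2 ∧ p.2 < 5) ∧
  ((0 ≤ train_per_category ∧ 0 ≤ test_per_category) ∨
   (train_per_category ≤ 0 ∧ train_per_category + test_per_category ≤ 0) ∨
   (0 ≤ train_per_category ∧ test_per_category ≤ 0 ∧
    ∀ i ∈ PySem.List.pyRange 0 5 1,
      ((labels.countP (fun p => p.2 == i)) : Int) ≤ train_per_category + test_per_category) ∨
   (train_per_category ≤ 0 ∧ 0 ≤ train_per_category + test_per_category ∧
    ∀ i ∈ PySem.List.pyRange 0 5 1,
      ((labels.countP (fun p => p.2 == i)) : Int) ≤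
        min (-train_per_category) (train_per_category + test_per_category)) ∨
   labels = [])
instance (labels : List (String × Int)) (train_per_category : Int) (test_per_category : Int) : Decidable (Pre_select_images_per_category labels train_per_category test_per_category) := by unfold Pre_select_images_per_category; infer_instance

def pvWitness_select_images_per_category : (List (String × Int)) × Int × Int := ([("a", 0), ("b", 1), ("c", 0)], 1, 1)

def Spec_select_images_per_category (labels : List (String × Int)) (train_per_category : Int) (test_per_category : Int) (out : List String × List String) : Prop := out = select_images_per_category_alt labels train_per_category test_per_category
instance (labels : List (String × Int)) (train_per_category : Int) (test_per_category : Int) (out : List String × List String) : Decidable (Spec_select_images_per_category labels train_per_category test_per_category out) := by unfold Spec_select_images_per_category; infer_instance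

-- ===== CLAIM (what is proved, stated in full; the proofs are below) =====
def Claim_equal_select_images_per_category : Prop := ∀ (labels : List (String × Int)) (train_per_category : Int) (test_per_category : Int), Dom_select_images_per_category labels train_per_category test_per_category → Pre_select_images_per_category labels train_per_category test_per_category → Spec_select_images_per_category labels train_per_category test_per_category (select_images_per_category labels train_per_category test_per_category)

-- ===== LEMMAS AND PROOFS =====

-- getD on the initial {i: [] for i in range(5)} dict is the default, for ANY key
theorem pv_getD_init_list (i : Int) :
    (PySem.Dict.ofList ((PySem.List.pyRange 0 5 1).map (fun j => (j, ([] : List String))))).getD i [] = [] := by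
  have h : PySem.Dict.ofList ((PySem.List.pyRange 0 5 1).map (fun j => (j, ([] : List String))))
      = PySem.Dict.mk [(0, []), (1, []), (2, []), (3, []), (4, [])] := by decide
  rw [h]
  simp only [PySem.Dict.getD_eq_get?_getD, PySem.Dict.get?_mk_cons]
  split_ifs <;> rfl

theorem pv_getD_init_int (i : Int) :
    (PySem.Dict.ofList ((PySem.List.pyRange 0 5 1).map (fun j => (j, (0 : Int))))).getD i 0 = 0 := by
  have h : PySem.Dict.ofList ((PySem.List.pyRange 0 5 1).map (fun j => (j, (0 : Int))))
      = PySem.Dict.mk [(0, 0), (1, 0), (2, 0), (3, 0), (4, 0)] := by decide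
  rw [h]
  simp only [PySem.Dict.getD_eq_get?_getD, PySem.Dict.get?_mk_cons]
  split_ifs <;> rfl

-- per-key projection of A's filling loop: a fold over the filenames with label i
theorem pv_projA (tr te : Int) (ls : List (String × Int)) (d : PySem.Dict Int (List String)) (i : Int) :
    (ls.foldl (fun d p =>
        if ((d.getD p.2 []).length : Int) < tr + te then d.insert p.2 (d.getD p.2 [] ++ [p.1]) else d) d).getD i []
    = ((ls.filter (fun p => p.2 == i)).map (·.1)).foldl
        (fun b x => if (b.length : Int) < tr + te then b ++ [x] else b) (d.getD i []) := by
  induction ls generalizing d with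
  | nil => rfl
  | cons p ls ih =>
    simp only [List.foldl_cons, List.filter_cons]
    by_cases h : p.2 = i
    · subst h
      by_cases hlt : ((d.getD p.2 []).length : Int) < tr + te
      · rw [if_pos hlt, ih]
        simp [hlt]
      · rw [if_neg hlt, ih]
        simp [hlt]
    · by_cases hlt : ((d.getD p.2 []).length : Int) < tr + te
      · rw [if_pos hlt, ih]
        simp [PySem.Dict.getD_insert, h, Ne.symm h]
      · rw [if_neg hlt, ih]
        simp [h]

-- per-key projection of B's routing loop (all three dicts at once)
theorem pv_projB (tr te : Int) (ls : List (String × Int))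
    (d1 : PySem.Dict Int Int) (d2 d3 : PySem.Dict Int (List String)) (i : Int) :
    ((ls.foldl (fun (st : PySem.Dict Int Int × PySem.Dict Int (List String) × PySem.Dict Int (List String)) p =>
        if st.1.getD p.2 0 < tr then
          (st.1.insert p.2 (st.1.getD p.2 0 + 1), st.2.1.insert p.2 (st.2.1.getD p.2 [] ++ [p.1]), st.2.2)
        else if st.1.getD p.2 0 < tr + te then
          (st.1.insert p.2 (st.1.getD p.2 0 + 1), st.2.1, st.2.2.insert p.2 (st.2.2.getD p.2 [] ++ [p.1]))
        else st) (d1, d2, d3)).1.getD i 0,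
     (ls.foldl (fun (st : PySem.Dict Int Int × PySem.Dict Int (List String) × PySem.Dict Int (List String)) p =>
        if st.1.getD p.2 0 < tr then
          (st.1.insert p.2 (st.1.getD p.2 0 + 1), st.2.1.insert p.2 (st.2.1.getD p.2 [] ++ [p.1]), st.2.2)
        else if st.1.getD p.2 0 < tr + te then
          (st.1.insert p.2 (st.1.getD p.2 0 + 1), st.2.1, st.2.2.insert p.2 (st.2.2.getD p.2 [] ++ [p.1]))
        else st) (d1, d2, d3)).2.1.getD i [],
     (ls.foldl (fun (st : PySem.Dict Int Int × PySem.Dict Int (List String) × PySem.Dict Int (List String)) p =>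
        if st.1.getD p.2 0 < tr then
          (st.1.insert p.2 (st.1.getD p.2 0 + 1), st.2.1.insert p.2 (st.2.1.getD p.2 [] ++ [p.1]), st.2.2)
        else if st.1.getD p.2 0 < tr + te then
          (st.1.insert p.2 (st.1.getD p.2 0 + 1), st.2.1, st.2.2.insert p.2 (st.2.2.getD p.2 [] ++ [p.1]))
        else st) (d1, d2, d3)).2.2.getD i [])
    = ((ls.filter (fun p => p.2 == i)).map (·.1)).foldl
        (fun (s : Int × List String × List String) x =>
          if s.1 < tr then (s.1 + 1, s.2.1 ++ [x], s.2.2)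
          else if s.1 < tr + te then (s.1 + 1, s.2.1, s.2.2 ++ [x])
          else s) (d1.getD i 0, d2.getD i [], d3.getD i []) := by
  induction ls generalizing d1 d2 d3 with
  | nil => rfl
  | cons p ls ih =>
    simp only [List.foldl_cons, List.filter_cons]
    by_cases h : p.2 = i
    · subst h
      by_cases h1 : d1.getD p.2 0 < tr
      · rw [if_pos h1, ih]
        simp [h1]
      · by_cases h2 : d1.getD p.2 0 < tr + te
        · rw [if_neg h1, if_pos h2, ih]
          simp [h1, h2]
        · rw [if_neg h1, if_neg h2, ih]
          simp [h1, h2]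
    · by_cases h1 : d1.getD p.2 0 < tr
      · rw [if_pos h1, ih]
        simp [PySem.Dict.getD_insert, h, Ne.symm h]
      · by_cases h2 : d1.getD p.2 0 < tr + te
        · rw [if_neg h1, if_pos h2, ih]
          simp [PySem.Dict.getD_insert, h, Ne.symm h]
        · rw [if_neg h1, if_neg h2, ih]
          simp [h]

-- A's capped bucket never exceeds tr + te
theorem pv_len_bound (tr te : Int) (l : List String) (b : List String)
    (hb : (b.length : Int) ≤ tr + te) :
    (((l.foldl (fun b x => if (b.length : Int) < tr + te then b ++ [x] else b) b).length : Int)) ≤ tr + te := by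
  induction l generalizing b with
  | nil => simpa using hb
  | cons x l ih =>
    simp only [List.foldl_cons]
    by_cases h : (b.length : Int) < tr + te
    · rw [if_pos h]; exact ih _ (by simp; omega)
    · rw [if_neg h]; exact ih _ hb

-- the inductive heart: B's per-key state tracks A's per-key bucket
theorem pv_key_rel (tr te : Int) (htr : 0 ≤ tr) (hte : 0 ≤ te) (l : List String)
    (b : List String) (s : Int × List String × List String)
    (h1 : s.1 = (b.length : Int)) (h2 : s.2.1 = b.take tr.toNat) (h3 : s.2.2 = b.drop tr.toNat)
    (h4 : (b.length : Int) ≤ tr + te) :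
    (l.foldl (fun (s : Int × List String × List String) x =>
        if s.1 < tr then (s.1 + 1, s.2.1 ++ [x], s.2.2)
        else if s.1 < tr + te then (s.1 + 1, s.2.1, s.2.2 ++ [x])
        else s) s)
    = (((l.foldl (fun b x => if (b.length : Int) < tr + te then b ++ [x] else b) b).length : Int),
       (l.foldl (fun b x => if (b.length : Int) < tr + te then b ++ [x] else b) b).take tr.toNat,
       (l.foldl (fun b x => if (b.length : Int) < tr + te then b ++ [x] else b) b).drop tr.toNat) := by
  induction l generalizing b s with
  | nil =>
    simp only [List.foldl_nil]
    obtain ⟨c, t1, t2⟩ := s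
    simp only [] at h1 h2 h3
    simp [h1, h2, h3]
  | cons x l ih =>
    simp only [List.foldl_cons]
    by_cases hc1 : s.1 < tr
    · have hlen : b.length < tr.toNat := by omega
      have hA : (b.length : Int) < tr + te := by omega
      rw [if_pos hc1, if_pos hA]
      refine ih (b ++ [x]) _ ?_ ?_ ?_ ?_
      · simp [h1]
      · rw [h2, List.take_of_length_le (by omega : b.length ≤ tr.toNat),
            List.take_of_length_le (by simp; omega : (b ++ [x]).length ≤ tr.toNat)]
      · rw [h3, List.drop_eq_nil_of_le (by omega : b.length ≤ tr.toNat),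
            List.drop_eq_nil_of_le (by simp; omega : (b ++ [x]).length ≤ tr.toNat)]
      · simp; omega
    · by_cases hc2 : s.1 < tr + te
      · have hA : (b.length : Int) < tr + te := by omega
        have hlen : tr.toNat ≤ b.length := by omega
        rw [if_neg hc1, if_pos hc2, if_pos hA]
        refine ih (b ++ [x]) _ ?_ ?_ ?_ ?_
        · simp [h1]
        · rw [h2, List.take_append_of_le_length hlen]
        · rw [h3, List.drop_append_of_le_length hlen]
        · simp; omega
      · have hA : ¬ (b.length : Int) < tr + te := by omega
        rw [if_neg hc1, if_neg hc2, if_neg hA]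
        exact ih b s h1 h2 h3 h4


-- with a nonpositive cap, A's filling loop leaves any all-default dict unchanged
theorem pv_fill_const (tr te : Int) (hc : tr + te ≤ 0) (ls : List (String × Int))
    (d : PySem.Dict Int (List String)) (hd : ∀ k, d.getD k [] = []) :
    ls.foldl (fun d p =>
        if ((d.getD p.2 []).length : Int) < tr + te then d.insert p.2 (d.getD p.2 [] ++ [p.1]) else d) d = d := by
  induction ls with
  | nil => rfl
  | cons p ls ih =>
    simp only [List.foldl_cons]
    rw [if_neg (by rw [hd p.2]; simp; omega), ih]

-- with tr ≤ 0 and tr + te ≤ 0, B's routing loop leaves the all-zero-count state unchanged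
theorem pv_route_const (tr te : Int) (htr : tr ≤ 0) (hc : tr + te ≤ 0) (ls : List (String × Int))
    (d1 : PySem.Dict Int Int) (d2 d3 : PySem.Dict Int (List String)) (h1 : ∀ k, d1.getD k 0 = 0) :
    ls.foldl (fun (st : PySem.Dict Int Int × PySem.Dict Int (List String) × PySem.Dict Int (List String)) p =>
        if st.1.getD p.2 0 < tr then
          (st.1.insert p.2 (st.1.getD p.2 0 + 1), st.2.1.insert p.2 (st.2.1.getD p.2 [] ++ [p.1]), st.2.2)
        else if st.1.getD p.2 0 < tr + te then
          (st.1.insert p.2 (st.1.getD p.2 0 + 1), st.2.1, st.2.2.insert p.2 (st.2.2.getD p.2 [] ++ [p.1]))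
        else st) (d1, d2, d3) = (d1, d2, d3) := by
  induction ls with
  | nil => rfl
  | cons p ls ih =>
    simp only [List.foldl_cons]
    rw [if_neg (by rw [h1 p.2]; omega), if_neg (by rw [h1 p.2]; omega), ih]

-- on the untouched initial dicts both output loops produce ([], [])
theorem pv_init_out (tr te : Int) :
    (PySem.List.pyRange 0 5 1).foldl (fun (acc : List String × List String) l =>
      (acc.1 ++ PySem.List.slice ((PySem.Dict.ofList ((PySem.List.pyRange 0 5 1).map
          (fun j => (j, ([] : List String))))).getD l []) none (some tr),
       acc.2 ++ PySem.List.slice ((PySem.Dict.ofList ((PySem.List.pyRange 0 5 1).map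
          (fun j => (j, ([] : List String))))).getD l []) (some tr) (some (tr + te)))) ([], [])
    = (PySem.List.pyRange 0 5 1).foldl (fun (acc : List String × List String) i =>
      (acc.1 ++ (PySem.Dict.ofList ((PySem.List.pyRange 0 5 1).map
          (fun j => (j, ([] : List String))))).getD i [],
       acc.2 ++ (PySem.Dict.ofList ((PySem.List.pyRange 0 5 1).map
          (fun j => (j, ([] : List String))))).getD i [])) ([], []) := by
  apply PySem.List.foldl_congr_mem
  intro acc x _
  rw [pv_getD_init_list x]
  simp [PySem.List.slice]


-- while the capacity is never reached, A's per-key fold just appends everything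
theorem pv_fill_all (tr te : Int) (l b : List String)
    (h : (b.length : Int) + (l.length : Int) ≤ tr + te) :
    l.foldl (fun b x => if (b.length : Int) < tr + te then b ++ [x] else b) b = b ++ l := by
  induction l generalizing b with
  | nil => simp
  | cons x l ih =>
    simp only [List.foldl_cons, List.length_cons] at h ⊢
    rw [if_pos (by push_cast at h; omega), ih (b ++ [x]) (by simp; push_cast at h ⊢; omega)]
    simp

-- with te ≤ 0, B's per-key routing keeps only the first tr items, all in the train bucket
theorem pv_key_rel_neg (tr te : Int) (htr : 0 ≤ tr) (hte : te ≤ 0) (l b : List String)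
    (s : Int × List String × List String)
    (h1 : s.1 = min (b.length : Int) tr) (h2 : s.2.1 = b.take tr.toNat) (h3 : s.2.2 = []) :
    (l.foldl (fun (s : Int × List String × List String) x =>
        if s.1 < tr then (s.1 + 1, s.2.1 ++ [x], s.2.2)
        else if s.1 < tr + te then (s.1 + 1, s.2.1, s.2.2 ++ [x])
        else s) s)
    = (min ((b ++ l).length : Int) tr, (b ++ l).take tr.toNat, []) := by
  induction l generalizing b s with
  | nil =>
    simp only [List.foldl_nil, List.append_nil]
    obtain ⟨c, t1, t2⟩ := s
    simp only [] at h1 h2 h3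
    simp [h1, h2, h3]
  | cons x l ih =>
    simp only [List.foldl_cons]
    have hbl : b ++ x :: l = (b ++ [x]) ++ l := by simp
    by_cases hc : s.1 < tr
    · have hlen : b.length < tr.toNat := by omega
      rw [if_pos hc, hbl]
      refine ih (b ++ [x]) _ ?_ ?_ ?_
      · simp only [List.length_append, List.length_singleton]
        push_cast
        omega
      · rw [h2, List.take_of_length_le (by omega : b.length ≤ tr.toNat),
            List.take_of_length_le (by simp; omega : (b ++ [x]).length ≤ tr.toNat)]
      · exact h3
    · have hlen : tr.toNat ≤ b.length := by omega
      rw [if_neg hc, if_neg (by omega), hbl]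
      refine ih (b ++ [x]) s ?_ ?_ h3
      · simp only [List.length_append, List.length_singleton]
        push_cast
        omega
      · rw [h2, List.take_append_of_le_length hlen]


-- Python's clamped slice indices on a short list
theorem pv_clamp_zero (n : Nat) (a : Int) (h : (n : Int) ≤ -a) : PySem.List.clampIdx n a = 0 := by
  simp only [PySem.List.clampIdx]
  split_ifs <;> omega

theorem pv_clamp_len (n : Nat) (b : Int) (h0 : 0 ≤ b) (h : (n : Int) ≤ b) :
    PySem.List.clampIdx n b = n := by
  simp only [PySem.List.clampIdx]
  split_ifs <;> omega

-- with tr ≤ 0 ≤ tr + te, B's per-key routing keeps the first tr+te items, all in the test bucket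
theorem pv_key_rel_negtr (tr te : Int) (htr : tr ≤ 0) (hte : 0 ≤ tr + te) (l b : List String)
    (s : Int × List String × List String)
    (h1 : s.1 = min (b.length : Int) (tr + te)) (h2 : s.2.1 = [])
    (h3 : s.2.2 = b.take (tr + te).toNat) :
    (l.foldl (fun (s : Int × List String × List String) x =>
        if s.1 < tr then (s.1 + 1, s.2.1 ++ [x], s.2.2)
        else if s.1 < tr + te then (s.1 + 1, s.2.1, s.2.2 ++ [x])
        else s) s)
    = (min ((b ++ l).length : Int) (tr + te), [], (b ++ l).take (tr + te).toNat) := by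
  induction l generalizing b s with
  | nil =>
    simp only [List.foldl_nil, List.append_nil]
    obtain ⟨c, t1, t2⟩ := s
    simp only [] at h1 h2 h3
    simp [h1, h2, h3]
  | cons x l ih =>
    simp only [List.foldl_cons]
    have hbl : b ++ x :: l = (b ++ [x]) ++ l := by simp
    rw [if_neg (by omega)]
    by_cases hc : s.1 < tr + te
    · have hlen : b.length < (tr + te).toNat := by omega
      rw [if_pos hc, hbl]
      refine ih (b ++ [x]) _ ?_ h2 ?_
      · simp only [List.length_append, List.length_singleton]
        push_cast
        omega
      · rw [h3, List.take_of_length_le (by omega : b.length ≤ (tr + te).toNat),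
            List.take_of_length_le (by simp; omega : (b ++ [x]).length ≤ (tr + te).toNat)]
    · have hlen : (tr + te).toNat ≤ b.length := by omega
      rw [if_neg hc, hbl]
      refine ih (b ++ [x]) s ?_ h2 ?_
      · simp only [List.length_append, List.length_singleton]
        push_cast
        omega
      · rw [h3, List.take_append_of_le_length hlen]

-- ===== VERDICT (by name: the statement is the Claim_ definition above) =====
theorem select_images_per_category_spec : Claim_equal_select_images_per_category := by
  intro labels tr te _ hpre
  obtain ⟨-, hcase⟩ := hpre
  unfold Spec_select_images_per_category
  unfold select_images_per_category select_images_per_category_alt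
  simp only []
  rcases hcase with ⟨htr, hte⟩ | ⟨htr, hsum⟩ | ⟨htr, hte, hcnt⟩ | ⟨htr, hsum, hcnt⟩ | hnil
  case inr.inr.inr.inl =>
    apply PySem.List.foldl_congr_mem
    intro acc i hi
    rw [pv_projA tr te labels _ i, pv_getD_init_list i]
    have hB := pv_projB tr te labels
        (PySem.Dict.ofList ((PySem.List.pyRange 0 5 1).map (fun j => (j, (0 : Int)))))
        (PySem.Dict.ofList ((PySem.List.pyRange 0 5 1).map (fun j => (j, ([] : List String)))))
        (PySem.Dict.ofList ((PySem.List.pyRange 0 5 1).map (fun j => (j, ([] : List String))))) i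
    have hlen : (((labels.filter (fun p => p.2 == i)).map (·.1)).length : Int) ≤
        min (-tr) (tr + te) := by
      rw [List.length_map, ← List.countP_eq_length_filter]
      exact hcnt i hi
    rw [pv_getD_init_int i, pv_getD_init_list i,
        pv_key_rel_negtr tr te htr hsum _ [] (0, [], [])
          (by simp; omega) rfl List.take_nil.symm] at hB
    simp only [List.nil_append, Prod.mk.injEq] at hB
    obtain ⟨-, hY, hZ⟩ := hB
    rw [hY, hZ,
        pv_fill_all tr te ((labels.filter (fun p => p.2 == i)).map (·.1)) []
          (by simp only [List.length_nil, Int.natCast_zero, zero_add]; omega),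
        List.nil_append,
        List.take_of_length_le (by omega : ((labels.filter (fun p => p.2 == i)).map (·.1)).length ≤ (tr + te).toNat)]
    simp only [PySem.List.slice,
        pv_clamp_zero ((labels.filter (fun p => p.2 == i)).map (·.1)).length tr (by omega),
        pv_clamp_len ((labels.filter (fun p => p.2 == i)).map (·.1)).length (tr + te) hsum (by omega)]
    simp
  case inr.inr.inl =>
    apply PySem.List.foldl_congr_mem
    intro acc i hi
    rw [pv_projA tr te labels _ i, pv_getD_init_list i]
    have hB := pv_projB tr te labels
        (PySem.Dict.ofList ((PySem.List.pyRange 0 5 1).map (fun j => (j, (0 : Int)))))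
        (PySem.Dict.ofList ((PySem.List.pyRange 0 5 1).map (fun j => (j, ([] : List String)))))
        (PySem.Dict.ofList ((PySem.List.pyRange 0 5 1).map (fun j => (j, ([] : List String))))) i
    have hlen : (((labels.filter (fun p => p.2 == i)).map (·.1)).length : Int) ≤ tr + te := by
      rw [List.length_map, ← List.countP_eq_length_filter]
      exact hcnt i hi
    rw [pv_getD_init_int i, pv_getD_init_list i,
        pv_key_rel_neg tr te htr hte _ [] (0, [], [])
          (by simp; omega) List.take_nil.symm rfl] at hB
    simp only [List.nil_append, Prod.mk.injEq] at hB
    obtain ⟨-, hY, hZ⟩ := hB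
    rw [hY, hZ,
        pv_fill_all tr te ((labels.filter (fun p => p.2 == i)).map (·.1)) []
          (by simpa using hlen),
        List.nil_append, PySem.List.slice_to _ htr,
        PySem.List.slice_toNat _ htr (by omega),
        List.drop_eq_nil_of_le (by omega : ((labels.filter (fun p => p.2 == i)).map (·.1)).length ≤ tr.toNat),
        List.take_nil]
  case inr.inr =>
    subst hnil
    simp only [List.foldl_nil]
    exact pv_init_out tr te
  case inr.inl =>
    rw [pv_fill_const tr te hsum labels _ (fun k => pv_getD_init_list k),
        pv_route_const tr te htr hsum labels _ _ _ (fun k => pv_getD_init_int k)]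
    exact pv_init_out tr te
  apply PySem.List.foldl_congr_mem
  intro acc i _
  rw [pv_projA tr te labels _ i, pv_getD_init_list i]
  have hB := pv_projB tr te labels
      (PySem.Dict.ofList ((PySem.List.pyRange 0 5 1).map (fun j => (j, (0 : Int)))))
      (PySem.Dict.ofList ((PySem.List.pyRange 0 5 1).map (fun j => (j, ([] : List String)))))
      (PySem.Dict.ofList ((PySem.List.pyRange 0 5 1).map (fun j => (j, ([] : List String))))) i
  rw [pv_getD_init_int i, pv_getD_init_list i, pv_key_rel tr te htr hte _ [] (0, [], [])
        rfl List.take_nil.symm List.drop_nil.symm (by simp only [List.length_nil, Int.natCast_zero]; omega)] at hB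
  simp only [Prod.mk.injEq] at hB
  obtain ⟨-, hY, hZ⟩ := hB
  rw [hY, hZ]
  have hbound := pv_len_bound tr te
      ((labels.filter (fun p => p.2 == i)).map (·.1)) []
      (by simp only [List.length_nil, Int.natCast_zero]; omega)
  rw [PySem.List.slice_to _ htr, PySem.List.slice_toNat _ htr (by omega),
      (by omega : (tr + te).toNat - tr.toNat = te.toNat)]
  exact Prod.ext rfl (congrArg (acc.2 ++ ·)
    (List.take_of_length_le (by simp only [List.length_drop]; omega)))
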